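-- pv_equiv track=rewrite | github.com/harsh15106/MedIQ | Symptom Chatbot/symptom_mapper.py | is_negated
-- ===== SOURCE A (Python) =====
-- NEGATIONS = {"no", "not", "dont", "without", "never", "none"}
--
-- def is_negated(text, match_start):
--     words = text.split()
--     char_positions = []
--     pos = 0
--
--     for word in words:
--         char_positions.append((word, pos))
--         pos += len(word) + 1
--
--     word_index = None
--     for i, (word, position) in enumerate(char_positions):
--         if position <= match_start < position + len(word):
--             word_index = i
--             break
--
--     if word_index is None:
--         return False
--
--     window_start = max(0, word_index - 4)
--     context_words = words[window_start:word_index]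
--
--     return any(w in NEGATIONS for w in context_words)
-- ===== SOURCE B (Python) =====
-- NEGATIONS = {"no", "not", "dont", "without", "never", "none"}
--
-- def is_negated(text, match_start):
--     pos = 0
--     window = []
--     for word in text.split():
--         if pos <= match_start < pos + len(word):
--             return any(w in NEGATIONS for w in window)
--         window.append(word)
--         if len(window) > 4:
--             window.pop(0)
--         pos += len(word) + 1
--     return False
-- ===== Notes on version B (the rewrite author's own statement) =====
-- stated objective: simpler
-- what changed: Replaced A's build-a-(word,position)-index-table pass, separate enumerate scan for the matched word, and list slice with one fused pass that tracks a running char position and a bounded window of the last <= 4 words, returning as soon as the matched word is reached.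
import Mathlib
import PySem

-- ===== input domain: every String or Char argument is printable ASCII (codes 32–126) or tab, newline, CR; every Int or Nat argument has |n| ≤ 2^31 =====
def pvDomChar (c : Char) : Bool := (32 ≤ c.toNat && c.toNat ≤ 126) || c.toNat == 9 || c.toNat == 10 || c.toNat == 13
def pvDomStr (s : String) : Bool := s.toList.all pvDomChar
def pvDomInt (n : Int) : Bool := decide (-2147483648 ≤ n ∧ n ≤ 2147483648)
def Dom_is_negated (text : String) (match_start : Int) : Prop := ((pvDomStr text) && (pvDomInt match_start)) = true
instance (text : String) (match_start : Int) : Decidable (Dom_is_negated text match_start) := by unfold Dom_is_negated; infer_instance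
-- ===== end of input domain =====

-- B replaces A's build-an-index-table-then-scan-then-slice with a single pass that keeps a
-- bounded window of the last ≤ 4 words (objective: simpler one-pass decomposition, same cost).

-- shared module-level constant NEGATIONS (a Python set literal)
def pvNegations : PySem.Set String :=
  PySem.Set.ofList ["no", "not", "dont", "without", "never", "none"]

-- ===== PORT A =====
-- first loop of A: build char_positions, pos += len(word) + 1
def pvBuild : List String → Int → List (String × Int)
  | [], _ => []
  | w :: ws, pos => (w, pos) :: pvBuild ws (pos + PySem.Str.len w + 1)

-- second loop of A: first i with position <= match_start < position + len(word)
def pvFind (m : Int) : List (String × Int) → Nat → Option Nat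
  | [], _ => none
  | (w, p) :: rest, i =>
      if p ≤ m ∧ m < p + PySem.Str.len w then some i else pvFind m rest (i + 1)

def is_negated (text : String) (match_start : Int) : Bool :=
  let words := PySem.Str.split₀ text
  let char_positions := pvBuild words 0
  match pvFind match_start char_positions 0 with
  | none => false
  | some word_index =>
      let window_start : Int := max 0 ((word_index : Int) - 4)
      let context_words := PySem.List.slice words (some window_start) (some (word_index : Int))
      context_words.any (fun w => pvNegations.contains w)

-- ===== PORT B =====
-- B's single loop: running char position and a window of the ≤ 4 previously seen words
def pvAltGo (m : Int) : List String → Int → List String → Bool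
  | [], _, _ => false
  | w :: rest, pos, window =>
      if pos ≤ m ∧ m < pos + PySem.Str.len w then
        window.any (fun x => pvNegations.contains x)
      else
        let window' := window ++ [w]
        let window'' := if window'.length > 4 then window'.tail else window'
        pvAltGo m rest (pos + PySem.Str.len w + 1) window''

def is_negated_alt (text : String) (match_start : Int) : Bool :=
  pvAltGo match_start (PySem.Str.split₀ text) 0 []

-- ===== PRECONDITION & SPEC =====
def Spec_is_negated (text : String) (match_start : Int) (out : Bool) : Prop := out = is_negated_alt text match_start
instance (text : String) (match_start : Int) (out : Bool) : Decidable (Spec_is_negated text match_start out) := by unfold Spec_is_negated; infer_instance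

-- ===== CLAIM (what is proved, stated in full; the proofs are below) =====
def Claim_equal_is_negated : Prop := ∀ (text : String) (match_start : Int), Dom_is_negated text match_start → Spec_is_negated text match_start (is_negated text match_start)

-- ===== LEMMAS AND PROOFS =====

-- shifting the running index of A's enumerate-search
lemma pvFind_shift (m : Int) (l : List (String × Int)) :
    ∀ i : Nat, pvFind m l (i + 1) = (pvFind m l i).map (· + 1) := by
  induction l with
  | nil => intro i; simp [pvFind]
  | cons p rest ih =>
      intro i
      obtain ⟨w, q⟩ := p
      simp only [pvFind]
      split_ifs with hc
      · simp
      · exact ih (i + 1)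

-- main invariant: B's one pass with a ≤4-word window computes A's find-then-window value
lemma pv_main (m : Int) (ws : List String) :
    ∀ (pos : Int) (win : List String), win.length ≤ 4 →
    pvAltGo m ws pos win =
      (match pvFind m (pvBuild ws pos) 0 with
       | none => false
       | some j =>
           ((win ++ ws.take j).drop (win.length + j - 4)).any
             (fun x => pvNegations.contains x)) := by
  induction ws with
  | nil => intro pos win _; simp [pvAltGo, pvBuild, pvFind]
  | cons w rest ih =>
      intro pos win hwin
      rw [pvAltGo, pvBuild, pvFind]
      dsimp only
      by_cases hc : pos ≤ m ∧ m < pos + PySem.Str.len w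
      · rw [if_pos hc, if_pos hc]
        simp [Nat.sub_eq_zero_of_le hwin]
      · rw [if_neg hc, if_neg hc,
            pvFind_shift m (pvBuild rest (pos + PySem.Str.len w + 1)) 0]
        by_cases hlen : (win ++ [w]).length > 4
        · -- full window: drop the oldest word
          have h4 : win.length = 4 := by simp at hlen; omega
          rw [if_pos hlen,
              ih (pos + PySem.Str.len w + 1) ((win ++ [w]).tail) (by simp [h4])]
          cases hf : pvFind m (pvBuild rest (pos + PySem.Str.len w + 1)) 0 with
          | none => simp
          | some j =>
              simp only [Option.map_some]
              congr 1
              have hlen' : ((win ++ [w]).tail).length = 4 := by simp [h4]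
              have e1 : win ++ (w :: rest.take j) = (win ++ [w]) ++ rest.take j := by simp
              rw [List.take_succ_cons, e1, List.drop_append, hlen', List.drop_append]
              have etail : (win ++ [w]).tail = (win ++ [w]).drop 1 := by
                cases win <;> simp
              rw [etail, List.drop_drop]
              have h5 : (win ++ [w]).length = 5 := by simp [h4]
              rw [h5]
              have ha : win.length + (j + 1) - 4 = 1 + (4 + j - 4) := by omega
              rw [ha]
              congr 2
              omega
        · -- window not yet full: identical expressions
          have hlt : win.length + 1 ≤ 4 := by simp at hlen; omega
          rw [if_neg hlen,
              ih (pos + PySem.Str.len w + 1) (win ++ [w]) (by simp; omega)]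
          cases hf : pvFind m (pvBuild rest (pos + PySem.Str.len w + 1)) 0 with
          | none => simp
          | some j =>
              simp only [Option.map_some]
              congr 1
              rw [List.take_succ_cons]
              have e1 : win ++ (w :: rest.take j) = (win ++ [w]) ++ rest.take j := by simp
              rw [e1]
              congr 1
              simp
              omega

-- A's slice words[max(0, j-4) : j] is drop (j-4) of take j
lemma pv_slice_window (words : List String) (j : Nat) :
    PySem.List.slice words (some (max 0 ((j : Int) - 4))) (some (j : Int)) =
      ((words.take j).drop (j - 4)) := by
  rw [PySem.List.slice_toNat words (le_max_left _ _) (by positivity)]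
  have h1 : (max 0 ((j : Int) - 4)).toNat = j - 4 := by omega
  have h2 : ((j : Int)).toNat = j := by omega
  rw [h1, h2, List.drop_take]

-- ===== VERDICT (by name: the statement is the Claim_ definition above) =====
theorem is_negated_spec : Claim_equal_is_negated := by
  intro text m _
  unfold Spec_is_negated is_negated is_negated_alt
  rw [pv_main m (PySem.Str.split₀ text) 0 [] (by simp)]
  simp only [List.nil_append, List.length_nil, Nat.zero_add]
  cases hf : pvFind m (pvBuild (PySem.Str.split₀ text) 0) 0 with
  | none => rfl
  | some j => simp only [pv_slice_window]
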